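-- pv_equiv track=rewrite | github.com/kaayra2000/veri_sikistirma | veri_sikistirma.py | zigzag_reshape
-- ===== SOURCE A (Python) =====
-- def zigzag_reshape(data, rows, cols):
--     matrix = [[None] * cols for _ in range(rows)]
--     iter_data = iter(data)
--     for d in range(rows + cols - 1):
--         if d % 2 == 0:
--             row = min(d, rows - 1)
--             col = max(0, d - rows + 1)
--             while row >= 0 and col < cols:
--                 matrix[row][col] = next(iter_data)
--                 row -= 1
--                 col += 1
--         else:
--             col = min(d, cols - 1)
--             row = max(0, d - cols + 1)
--             while col >= 0 and row < rows:
--                 matrix[row][col] = next(iter_data)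
--                 row += 1
--                 col -= 1
--     return matrix
-- ===== SOURCE B (Python) =====
-- def zigzag_reshape(data, rows, cols):
--     matrix = [[None] * cols for _ in range(rows)]
--     scale = 2 * (rows + cols) + 1
--     order = sorted(((r, c) for r in range(rows) for c in range(cols)),
--                    key=lambda rc: (rc[0] + rc[1]) * scale
--                                   + (rc[0] if (rc[0] + rc[1]) % 2 else -rc[0]))
--     iter_data = iter(data)
--     for r, c in order:
--         matrix[r][c] = next(iter_data)
--     return matrix
-- ===== Notes on version B (the rewrite author's own statement) =====
-- stated objective: alternative
-- what changed: Replaces A's per-diagonal start-cell computation and two bidirectional while-walks with one sort: enumerate all (r,c), sort them by an integer zigzag key (diagonal-major, row descending on even diagonals, ascending on odd), then fill the matrix in a single flat pass over the sorted coordinates.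
import Mathlib
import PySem

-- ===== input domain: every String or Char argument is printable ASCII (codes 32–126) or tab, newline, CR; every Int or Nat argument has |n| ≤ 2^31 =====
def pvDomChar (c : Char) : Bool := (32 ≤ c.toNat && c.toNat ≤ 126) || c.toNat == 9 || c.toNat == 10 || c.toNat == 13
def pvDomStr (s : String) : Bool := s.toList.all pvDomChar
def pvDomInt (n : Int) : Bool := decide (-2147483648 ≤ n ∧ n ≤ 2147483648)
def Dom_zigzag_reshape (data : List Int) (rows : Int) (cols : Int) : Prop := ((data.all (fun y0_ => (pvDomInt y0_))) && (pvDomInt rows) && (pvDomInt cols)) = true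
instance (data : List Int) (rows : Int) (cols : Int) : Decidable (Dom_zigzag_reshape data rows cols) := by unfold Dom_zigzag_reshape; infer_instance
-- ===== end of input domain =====

-- B replaces A's per-diagonal start-cell computation and bidirectional while-walks by one sort of all
-- (r,c) coordinates under an integer zigzag key followed by a single flat fill pass (objective: alternative).


-- ===== PORT A =====
-- matrix[row][col] = v  (indices produced by the loops are always in range, so List.set is exact)
def pvSet (m : List (List (Option Int))) (r c : Int) (v : Int) : List (List (Option Int)) :=
  m.set r.toNat ((m.getD r.toNat []).set c.toNat (some v))

-- matrix[row][col] = next(iter_data); on an exhausted iterator Python raises StopIteration (outside Pre_),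
-- here modelled as a no-op
def pvStep (st : List (List (Option Int)) × List Int) (r c : Int) :
    List (List (Option Int)) × List Int :=
  match st.2 with
  | x :: xs => (pvSet st.1 r c x, xs)
  | [] => (st.1, [])

-- the even-diagonal while loop: while row >= 0 and col < cols: assign; row -= 1; col += 1
def pvWalkEven (cols : Int) (row col : Int) (st : List (List (Option Int)) × List Int) :
    List (List (Option Int)) × List Int :=
  if h : 0 ≤ row ∧ col < cols then
    pvWalkEven cols (row - 1) (col + 1) (pvStep st row col)
  else st
termination_by (row + 1).toNat
decreasing_by omega

-- the odd-diagonal while loop: while col >= 0 and row < rows: assign; row += 1; col -= 1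
def pvWalkOdd (rows : Int) (row col : Int) (st : List (List (Option Int)) × List Int) :
    List (List (Option Int)) × List Int :=
  if h : 0 ≤ col ∧ row < rows then
    pvWalkOdd rows (row + 1) (col - 1) (pvStep st row col)
  else st
termination_by (col + 1).toNat
decreasing_by omega

def zigzag_reshape (data : List Int) (rows : Int) (cols : Int) : List (List (Option Int)) :=
  ((PySem.List.pyRange 0 (rows + cols - 1) 1).foldl
    (fun st d =>
      if PySem.Int.mod d 2 = 0 then
        pvWalkEven cols (min d (rows - 1)) (max 0 (d - rows + 1)) st
      else
        pvWalkOdd rows (max 0 (d - cols + 1)) (min d (cols - 1)) st)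
    ((PySem.List.pyRange 0 rows 1).map (fun _ => List.replicate cols.toNat (none : Option Int)), data)).1

-- ===== PORT B =====
-- the sort key of Source B: (r+c)*scale + (r if (r+c) % 2 else -r)
def pvKey (scale : Int) (rc : Int × Int) : Int :=
  (rc.1 + rc.2) * scale + (if PySem.Int.mod (rc.1 + rc.2) 2 ≠ 0 then rc.1 else -rc.1)

def zigzag_reshape_alt (data : List Int) (rows : Int) (cols : Int) : List (List (Option Int)) :=
  let scale := 2 * (rows + cols) + 1
  let coords := (PySem.List.pyRange 0 rows 1).flatMap
    (fun r => (PySem.List.pyRange 0 cols 1).map (fun c => (r, c)))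
  let order := PySem.List.sorted coords (pvKey scale) false
  (order.foldl (fun st rc => pvStep st rc.1 rc.2)
    ((PySem.List.pyRange 0 rows 1).map (fun _ => List.replicate cols.toNat (none : Option Int)), data)).1

-- ===== PRECONDITION & SPEC =====
-- Pre_ excludes exactly the inputs where Python raises StopIteration: fewer data items than matrix cells.
def Pre_zigzag_reshape (data : List Int) (rows : Int) (cols : Int) : Prop :=
  max 0 rows * max 0 cols ≤ (data.length : Int)
instance (data : List Int) (rows : Int) (cols : Int) : Decidable (Pre_zigzag_reshape data rows cols) := by
  unfold Pre_zigzag_reshape; infer_instance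

def pvWitness_zigzag_reshape : List Int × Int × Int := ([1, 2, 3, 4, 5, 6], 2, 3)

def Spec_zigzag_reshape (data : List Int) (rows : Int) (cols : Int) (out : List (List (Option Int))) : Prop := out = zigzag_reshape_alt data rows cols
instance (data : List Int) (rows : Int) (cols : Int) (out : List (List (Option Int))) : Decidable (Spec_zigzag_reshape data rows cols out) := by unfold Spec_zigzag_reshape; infer_instance

-- ===== CLAIM (what is proved, stated in full; the proofs are below) =====
def Claim_equal_zigzag_reshape : Prop := ∀ (data : List Int) (rows : Int) (cols : Int), Dom_zigzag_reshape data rows cols → Pre_zigzag_reshape data rows cols → Spec_zigzag_reshape data rows cols (zigzag_reshape data rows cols)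

-- ===== LEMMAS AND PROOFS =====

-- coordinate trace of the even-diagonal while loop
def walkEvenCoords (cols : Int) (row col : Int) : List (Int × Int) :=
  if h : 0 ≤ row ∧ col < cols then (row, col) :: walkEvenCoords cols (row - 1) (col + 1) else []
termination_by (row + 1).toNat
decreasing_by omega

-- coordinate trace of the odd-diagonal while loop
def walkOddCoords (rows : Int) (row col : Int) : List (Int × Int) :=
  if h : 0 ≤ col ∧ row < rows then (row, col) :: walkOddCoords rows (row + 1) (col - 1) else []
termination_by (col + 1).toNat
decreasing_by omega

-- coordinate trace of one diagonal of A
def diagCoords (rows cols d : Int) : List (Int × Int) :=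
  if PySem.Int.mod d 2 = 0 then
    walkEvenCoords cols (min d (rows - 1)) (max 0 (d - rows + 1))
  else
    walkOddCoords rows (max 0 (d - cols + 1)) (min d (cols - 1))

lemma walkEven_eq_foldl (cols row col : Int) (st : List (List (Option Int)) × List Int) :
    pvWalkEven cols row col st = (walkEvenCoords cols row col).foldl (fun s rc => pvStep s rc.1 rc.2) st := by
  fun_induction pvWalkEven cols row col st with
  | case1 row col st h ih => rw [walkEvenCoords]; simp [h, ih]
  | case2 row col st h => rw [walkEvenCoords]; simp [h]

lemma walkOdd_eq_foldl (rows row col : Int) (st : List (List (Option Int)) × List Int) :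
    pvWalkOdd rows row col st = (walkOddCoords rows row col).foldl (fun s rc => pvStep s rc.1 rc.2) st := by
  fun_induction pvWalkOdd rows row col st with
  | case1 row col st h ih => rw [walkOddCoords]; simp [h, ih]
  | case2 row col st h => rw [walkOddCoords]; simp [h]

lemma mem_walkEvenCoords (cols row col : Int) (x : Int × Int) :
    x ∈ walkEvenCoords cols row col ↔
      x.1 + x.2 = row + col ∧ 0 ≤ x.1 ∧ x.1 ≤ row ∧ x.2 < cols := by
  fun_induction walkEvenCoords cols row col with
  | case1 row col h ih =>
    simp only [List.mem_cons, ih]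
    constructor
    · rintro (rfl | ⟨h1, h2, h3, h4⟩) <;> omega
    · rintro ⟨h1, h2, h3, h4⟩
      by_cases hx : x = (row, col)
      · exact Or.inl hx
      · refine Or.inr ⟨by omega, by omega, ?_, by omega⟩
        rcases x with ⟨a, b⟩
        simp only [Prod.mk.injEq] at hx
        omega
  | case2 row col h => simp; omega

lemma mem_walkOddCoords (rows row col : Int) (x : Int × Int) :
    x ∈ walkOddCoords rows row col ↔
      x.1 + x.2 = row + col ∧ 0 ≤ x.2 ∧ x.2 ≤ col ∧ x.1 < rows := by
  fun_induction walkOddCoords rows row col with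
  | case1 row col h ih =>
    simp only [List.mem_cons, ih]
    constructor
    · rintro (rfl | ⟨h1, h2, h3, h4⟩) <;> omega
    · rintro ⟨h1, h2, h3, h4⟩
      by_cases hx : x = (row, col)
      · exact Or.inl hx
      · refine Or.inr ⟨by omega, by omega, ?_, by omega⟩
        rcases x with ⟨a, b⟩
        simp only [Prod.mk.injEq] at hx
        omega
  | case2 row col h => simp; omega

lemma mem_diagCoords (rows cols d : Int) (x : Int × Int) :
    x ∈ diagCoords rows cols d ↔
      x.1 + x.2 = d ∧ 0 ≤ x.1 ∧ x.1 < rows ∧ 0 ≤ x.2 ∧ x.2 < cols := by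
  unfold diagCoords
  split
  · rw [mem_walkEvenCoords]; omega
  · rw [mem_walkOddCoords]; omega

lemma pairwise_fst_walkEvenCoords (cols row col : Int) :
    (walkEvenCoords cols row col).Pairwise (fun a b => b.1 < a.1) := by
  fun_induction walkEvenCoords cols row col with
  | case1 row col h ih =>
    refine List.Pairwise.cons ?_ ih
    intro b hb
    rw [mem_walkEvenCoords] at hb
    omega
  | case2 row col h => exact List.Pairwise.nil

lemma pairwise_fst_walkOddCoords (rows row col : Int) :
    (walkOddCoords rows row col).Pairwise (fun a b => a.1 < b.1) := by
  fun_induction walkOddCoords rows row col with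
  | case1 row col h ih =>
    refine List.Pairwise.cons ?_ ih
    intro b hb
    rw [mem_walkOddCoords] at hb
    omega
  | case2 row col h => exact List.Pairwise.nil

lemma pairwise_key_diagCoords (rows cols d scale : Int) :
    (diagCoords rows cols d).Pairwise (fun a b => pvKey scale a < pvKey scale b) := by
  unfold diagCoords
  split
  · rename_i hpar
    refine (pairwise_fst_walkEvenCoords cols _ _).imp_of_mem ?_
    intro a b ha hb hab
    rw [mem_walkEvenCoords] at ha hb
    have hsum : min d (rows - 1) + max 0 (d - rows + 1) = d := by omega
    rw [hsum] at ha hb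
    have ha1 : a.1 + a.2 = d := ha.1
    have hb1 : b.1 + b.2 = d := hb.1
    simp only [pvKey, ha1, hb1, hpar, ne_eq, not_true_eq_false, if_false]
    omega
  · rename_i hpar
    refine (pairwise_fst_walkOddCoords rows _ _).imp_of_mem ?_
    intro a b ha hb hab
    rw [mem_walkOddCoords] at ha hb
    have hsum : max 0 (d - cols + 1) + min d (cols - 1) = d := by omega
    rw [hsum] at ha hb
    have ha1 : a.1 + a.2 = d := ha.1
    have hb1 : b.1 + b.2 = d := hb.1
    simp only [pvKey, ha1, hb1, hpar, ne_eq, not_false_eq_true, if_true]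
    omega

-- A's full coordinate trace
def traceA (rows cols : Int) : List (Int × Int) :=
  (PySem.List.pyRange 0 (rows + cols - 1) 1).flatMap (diagCoords rows cols)

lemma pairwise_key_traceA (rows cols : Int) :
    (traceA rows cols).Pairwise (fun a b => pvKey (2 * (rows + cols) + 1) a < pvKey (2 * (rows + cols) + 1) b) := by
  unfold traceA
  rw [List.pairwise_flatMap]
  refine ⟨fun d _ => pairwise_key_diagCoords rows cols d _, ?_⟩
  refine (PySem.List.pairwise_lt_pyRange_one ..).imp_of_mem ?_
  intro d d' hd hd' hlt a ha b hb
  rw [PySem.List.mem_pyRange_one] at hd hd'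
  rw [mem_diagCoords] at ha hb
  obtain ⟨ha1, ha2, ha3, ha4, ha5⟩ := ha
  obtain ⟨hb1, hb2, hb3, hb4, hb5⟩ := hb
  have hS : (d + 1) * (2 * (rows + cols) + 1) ≤ d' * (2 * (rows + cols) + 1) := by
    have h1 : d + 1 ≤ d' := by omega
    have h2 : (0 : Int) ≤ 2 * (rows + cols) + 1 := by omega
    exact mul_le_mul_of_nonneg_right h1 h2
  simp only [pvKey, ha1, hb1]
  split_ifs <;> nlinarith

lemma nodup_traceA (rows cols : Int) : (traceA rows cols).Nodup :=
  (pairwise_key_traceA rows cols).imp (fun h => by intro he; rw [he] at h; omega)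

lemma mem_traceA (rows cols : Int) (x : Int × Int) :
    x ∈ traceA rows cols ↔ 0 ≤ x.1 ∧ x.1 < rows ∧ 0 ≤ x.2 ∧ x.2 < cols := by
  unfold traceA
  simp only [List.mem_flatMap, mem_diagCoords, PySem.List.mem_pyRange_one]
  constructor
  · rintro ⟨d, hd, h⟩; omega
  · intro h; exact ⟨x.1 + x.2, by omega, by omega⟩

-- B's unsorted coordinate list
def coordsB (rows cols : Int) : List (Int × Int) :=
  (PySem.List.pyRange 0 rows 1).flatMap
    (fun r => (PySem.List.pyRange 0 cols 1).map (fun c => (r, c)))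

lemma nodup_coordsB (rows cols : Int) : (coordsB rows cols).Nodup := by
  have hpw : (coordsB rows cols).Pairwise (fun a b => a ≠ b) := by
    unfold coordsB
    rw [List.pairwise_flatMap]
    constructor
    · intro r _
      rw [List.pairwise_map]
      refine (PySem.List.pairwise_lt_pyRange_one ..).imp ?_
      intro c c' h he
      simp only [Prod.mk.injEq] at he
      omega
    · refine (PySem.List.pairwise_lt_pyRange_one ..).imp ?_
      intro r r' h a ha b hb
      simp only [List.mem_map] at ha hb
      obtain ⟨c, _, rfl⟩ := ha
      obtain ⟨c', _, rfl⟩ := hb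
      simp only [ne_eq, Prod.mk.injEq]
      omega
  exact hpw

lemma mem_coordsB (rows cols : Int) (x : Int × Int) :
    x ∈ coordsB rows cols ↔ 0 ≤ x.1 ∧ x.1 < rows ∧ 0 ≤ x.2 ∧ x.2 < cols := by
  unfold coordsB
  simp only [List.mem_flatMap, List.mem_map, PySem.List.mem_pyRange_one]
  constructor
  · rintro ⟨r, hr, c, hc, rfl⟩; exact ⟨hr.1, hr.2, hc.1, hc.2⟩
  · intro h; exact ⟨x.1, ⟨h.1, h.2.1⟩, x.2, ⟨h.2.2.1, h.2.2.2⟩, rfl⟩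

lemma perm_traceA_coordsB (rows cols : Int) : (traceA rows cols).Perm (coordsB rows cols) := by
  rw [List.perm_ext_iff_of_nodup (nodup_traceA rows cols) (nodup_coordsB rows cols)]
  intro x
  rw [mem_traceA, mem_coordsB]

lemma sorted_eq_traceA (rows cols : Int) :
    PySem.List.sorted (coordsB rows cols) (pvKey (2 * (rows + cols) + 1)) false = traceA rows cols :=
  PySem.List.sorted_eq_of_perm_of_pairwise_lt _ _ _ (perm_traceA_coordsB rows cols) (pairwise_key_traceA rows cols)

-- ===== VERDICT (by name: the statement is the Claim_ definition above) =====
theorem zigzag_reshape_spec : Claim_equal_zigzag_reshape := by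
  intro data rows cols _ _
  unfold Spec_zigzag_reshape zigzag_reshape zigzag_reshape_alt
  dsimp only
  rw [show ((PySem.List.pyRange 0 rows 1).flatMap
      (fun r => (PySem.List.pyRange 0 cols 1).map (fun c => (r, c)))) = coordsB rows cols from rfl,
    sorted_eq_traceA]
  unfold traceA
  rw [List.foldl_flatMap]
  have hf : (fun (st : List (List (Option Int)) × List Int) (d : Int) =>
        if PySem.Int.mod d 2 = 0 then
          pvWalkEven cols (min d (rows - 1)) (max 0 (d - rows + 1)) st
        else
          pvWalkOdd rows (max 0 (d - cols + 1)) (min d (cols - 1)) st) =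
      (fun st d => (diagCoords rows cols d).foldl (fun s rc => pvStep s rc.1 rc.2) st) := by
    funext st d
    by_cases h : PySem.Int.mod d 2 = 0
    · simp only [diagCoords, if_pos h, walkEven_eq_foldl]
    · simp only [diagCoords, if_neg h, walkOdd_eq_foldl]
  rw [hf]
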